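-- pv_equiv track=rewrite | github.com/Viknesh-Rajaramon/Leetcode-Problems | Algorithms/Hard/3878_Count_Good_Subarrays/Python3.py | countGoodSubarrays
-- ===== SOURCE A (Python) =====
-- def countGoodSubarrays(nums: list[int]) -> int:
--     n = len(nums)
--     prev_one, next_one, left, right = [-1] * 31, [n] * 31, [0] * n, [n-1] * n
--     for i in range(n):
--         for bit in range(31):
--             if nums[i] & (1 << bit) == 0:
--                 left[i] = max(left[i], prev_one[bit]+1)
--             else:
--                 prev_one[bit] = i
--
--     for i in range(n-1, -1, -1):
--         for bit in range(31):
--             if nums[i] & (1 << bit) == 0: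
--                 right[i] = min(right[i], next_one[bit]-1)
--             else:
--                 next_one[bit] = i
--
--     result, last_idx = 0, {}
--     for i in range(n):
--         l, r = left[i], right[i]
--         if nums[i] in last_idx:
--             l = max(l, last_idx[nums[i]] + 1)
--
--         last_idx[nums[i]] = i
--         result += (i-l+1) * (r-i+1)
--
--     return result
-- ===== SOURCE B (Python) =====
-- def countGoodSubarrays(nums: list[int]) -> int:
--     n = len(nums)
--     MASK = (1 << 31) - 1
--     total = 0
--     for i in range(n):
--         x = nums[i]
--         l = i
--         while l > 0 and (nums[l - 1] & ~x) & MASK == 0 and nums[l - 1] != x: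
--             l -= 1
--         r = i
--         while r + 1 < n and (nums[r + 1] & ~x) & MASK == 0:
--             r += 1
--         total += (i - l + 1) * (r - i + 1)
--     return total
-- ===== Notes on version B (the rewrite author's own statement) =====
-- stated objective: alternative
-- what changed: Replaces A's three passes (31-entry prev_one/next_one bit tables plus a last-index dict) by a direct per-pivot left/right scan for the nearest blocking element, summing the same (i-l+1)*(r-i+1) rectangle counts.
import Mathlib
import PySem

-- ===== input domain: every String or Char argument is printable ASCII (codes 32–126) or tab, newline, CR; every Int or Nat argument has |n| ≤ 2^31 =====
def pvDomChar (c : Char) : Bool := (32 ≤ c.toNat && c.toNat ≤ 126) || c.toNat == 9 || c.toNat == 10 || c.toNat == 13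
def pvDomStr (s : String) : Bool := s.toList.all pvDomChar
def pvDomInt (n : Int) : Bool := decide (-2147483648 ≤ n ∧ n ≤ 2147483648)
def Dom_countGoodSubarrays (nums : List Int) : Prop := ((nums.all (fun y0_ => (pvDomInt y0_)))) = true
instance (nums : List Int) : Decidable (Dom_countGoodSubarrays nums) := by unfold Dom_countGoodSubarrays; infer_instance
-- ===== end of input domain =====

-- B replaces A's three passes (31-bit prev/next tables plus a last-index dict) by, for each
-- pivot i, a direct left/right scan for the nearest blocking element; same exact result,
-- an alternative decomposition (A is O(31·n), B is O(n²) worst case).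

-- ===== PORT A =====
-- inner loop over the 31 bits of the left pass: state = (prev_one, left[i] accumulator)
def pyAInnerL (nums : List Int) (i : Nat) (s : List Int × Int) (bit : Nat) : List Int × Int :=
  if PySem.Int.band (nums.getD i 0) ((1:Int) <<< bit) == 0 then
    (s.1, max s.2 (s.1.getD bit 0 + 1))
  else (s.1.set bit (i : Int), s.2)

-- one step of the first (left) pass: state = (prev_one, left list so far)
def pyAStepL (nums : List Int) (st : List Int × List Int) (i : Nat) : List Int × List Int :=
  let inner := (List.range 31).foldl (pyAInnerL nums i) (st.1, 0)
  (inner.1, st.2 ++ [inner.2])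

-- inner loop over the 31 bits of the right pass: state = (next_one, right[i] accumulator)
def pyAInnerR (nums : List Int) (i : Nat) (s : List Int × Int) (bit : Nat) : List Int × Int :=
  if PySem.Int.band (nums.getD i 0) ((1:Int) <<< bit) == 0 then
    (s.1, min s.2 (s.1.getD bit 0 - 1))
  else (s.1.set bit (i : Int), s.2)

-- one step of the second (right) pass, i running from n-1 down to 0
def pyAStepR (nums : List Int) (n : Nat) (st : List Int × List Int) (i : Nat) : List Int × List Int :=
  let inner := (List.range 31).foldl (pyAInnerR nums i) (st.1, (n : Int) - 1)
  (inner.1, inner.2 :: st.2)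

-- one step of the third pass: state = (result, last_idx dict)
def pyAStep3 (nums left right : List Int) (st : Int × PySem.Dict Int Int) (i : Nat) :
    Int × PySem.Dict Int Int :=
  let x := nums.getD i 0
  let l := left.getD i 0
  let r := right.getD i 0
  let l' := match st.2.get? x with
    | some j => max l (j + 1)
    | none => l
  (st.1 + ((i : Int) - l' + 1) * (r - (i : Int) + 1), st.2.insert x (i : Int))

def countGoodSubarrays (nums : List Int) : Int :=
  let n := nums.length
  let left := ((List.range n).foldl (pyAStepL nums) (List.replicate 31 (-1 : Int), [])).2
  let right := ((List.range n).reverse.foldl (pyAStepR nums n) (List.replicate 31 (n : Int), [])).2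
  ((List.range n).foldl (pyAStep3 nums left right) (0, PySem.Dict.empty)).1

-- ===== PORT B =====
-- (nums[j] & ~x) & 0x7fffffff == 0 : nums[j] adds no bit (in the low 31) outside the pivot x
def pySub31 (a x : Int) : Bool := PySem.Int.band (PySem.Int.band a (Int.not x)) 2147483647 == 0

-- walk left from position l while the element before it is a strict-or-different submask of x
def pyWalkL (nums : List Int) (x : Int) : Nat → Nat
  | 0 => 0
  | l + 1 =>
    if pySub31 (nums.getD l 0) x && !(nums.getD l 0 == x) then pyWalkL nums x l else l + 1

-- walk right from position r while the next element is a submask of x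
def pyWalkR (nums : List Int) (x : Int) (n r : Nat) : Nat :=
  if h : r + 1 < n then
    if pySub31 (nums.getD (r + 1) 0) x then pyWalkR nums x n (r + 1) else r
  else r
termination_by n - r

def countGoodSubarrays_alt (nums : List Int) : Int :=
  let n := nums.length
  (List.range n).foldl (fun total i =>
    let x := nums.getD i 0
    let l := pyWalkL nums x i
    let r := pyWalkR nums x n i
    total + ((i : Int) - (l : Int) + 1) * ((r : Int) - (i : Int) + 1)) 0

-- ===== PRECONDITION & SPEC =====
def Spec_countGoodSubarrays (nums : List Int) (out : Int) : Prop := out = countGoodSubarrays_alt nums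
instance (nums : List Int) (out : Int) : Decidable (Spec_countGoodSubarrays nums out) := by unfold Spec_countGoodSubarrays; infer_instance

-- ===== CLAIM (what is proved, stated in full; the proofs are below) =====
def Claim_equal_countGoodSubarrays : Prop := ∀ (nums : List Int), Dom_countGoodSubarrays nums → Spec_countGoodSubarrays nums (countGoodSubarrays nums)

-- ===== LEMMAS AND PROOFS =====

/- ---------- bit-level bridge ---------- -/

theorem ldiff_add_land (m n : Nat) : Nat.ldiff m n + (m &&& n) = m := by
  induction m using Nat.binaryRec generalizing n with
  | zero => simp [Nat.ldiff]
  | bit b m ih =>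
    have hn : n = Nat.bit n.bodd n.div2 := (Nat.bit_bodd_div2 n).symm
    rw [hn, Nat.ldiff_bit, Nat.land_bit]
    have := ih n.div2
    cases b <;> cases n.bodd <;> simp [Nat.bit_val] at * <;> omega

theorem nat_eq_zero_iff_testBit (m : Nat) : m = 0 ↔ ∀ i, m.testBit i = false := by
  constructor
  · rintro rfl i; exact Nat.zero_testBit i
  · intro h; exact Nat.eq_of_testBit_eq (fun i => by simp [h i])

theorem band_eq_land (a b : Int) : PySem.Int.band a b = Int.land a b := by
  have key : ∀ (m n : Nat), m - (m &&& n) = Nat.ldiff m n := fun m n => by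
    have := ldiff_add_land m n; omega
  unfold PySem.Int.band
  cases a with
  | ofNat m =>
    cases b with
    | ofNat n => simp [Int.land]
    | negSucc n =>
      have h2 : ¬ (0:Int) ≤ Int.negSucc n := by simp [Int.negSucc_eq]; omega
      have h3 : (-(Int.negSucc n) - 1).toNat = n := by simp [Int.negSucc_eq]
      simp only [Int.ofNat_eq_natCast, Int.natCast_nonneg, if_true, h2, if_false, h3, Int.toNat_natCast]
      rw [key]; simp [Int.land]
  | negSucc m =>
    have h2 : ¬ (0:Int) ≤ Int.negSucc m := by simp [Int.negSucc_eq]; omega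
    have h3 : (-(Int.negSucc m) - 1).toNat = m := by simp [Int.negSucc_eq]
    cases b with
    | ofNat n =>
      simp only [h2, if_false, Int.ofNat_eq_natCast, Int.natCast_nonneg, if_true, h3, Int.toNat_natCast]
      rw [key]; simp [Int.land]
    | negSucc n =>
      have h4 : ¬ (0:Int) ≤ Int.negSucc n := by simp [Int.negSucc_eq]; omega
      have h5 : (-(Int.negSucc n) - 1).toNat = n := by simp [Int.negSucc_eq]
      simp only [h2, h4, if_false, h3, h5]
      simp [Int.land, Int.negSucc_eq]; ring

theorem nat_land_eq_zero_iff (m n : Nat) : (m &&& n = 0) ↔ ∀ i, m.testBit i = false ∨ n.testBit i = false := by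
  rw [nat_eq_zero_iff_testBit]
  constructor
  · intro h i; have := h i; rw [Nat.testBit_land] at this
    rcases Bool.and_eq_false_iff.mp this with h' | h' <;> [left; right] <;> exact h'
  · intro h i; rw [Nat.testBit_land]
    rcases h i with h' | h' <;> simp [h']

theorem nat_ldiff_eq_zero_iff (m n : Nat) : (Nat.ldiff m n = 0) ↔ ∀ i, m.testBit i = false ∨ n.testBit i = true := by
  rw [nat_eq_zero_iff_testBit]
  constructor
  · intro h i; have := h i; rw [Nat.testBit_ldiff] at this
    rcases Bool.and_eq_false_iff.mp this with h' | h' <;> [left; right] <;> simp_all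
  · intro h i; rw [Nat.testBit_ldiff]
    rcases h i with h' | h' <;> simp [h']

theorem land_two_pow_eq_zero (a : Int) (k : Nat) :
    (PySem.Int.band a ((1:Int) <<< k) = 0) ↔ a.testBit k = false := by
  rw [band_eq_land]
  have h1 : ((1:Int) <<< k) = Int.ofNat (2^k) := by
    show Int.ofNat (1 <<< k) = _
    simp [Nat.shiftLeft_eq]
  rw [h1]
  cases a with
  | ofNat m =>
    show (Int.ofNat (m &&& (2^k)) = 0) ↔ (m.testBit k = false)
    rw [show ∀ z : Nat, (Int.ofNat z = 0 ↔ z = 0) from fun z => by simp [Int.ofNat_eq_natCast]]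
    rw [nat_land_eq_zero_iff]
    constructor
    · intro h
      rcases h k with h' | h'
      · exact h'
      · exfalso; rw [Nat.testBit_two_pow] at h'; simp at h'
    · intro h i
      by_cases hik : i = k
      · subst hik; exact Or.inl h
      · right; rw [Nat.testBit_two_pow]; simp [Ne.symm hik]
  | negSucc m =>
    show (Int.ofNat (Nat.ldiff (2^k) m) = 0) ↔ ((!m.testBit k) = false)
    rw [show ∀ z : Nat, (Int.ofNat z = 0 ↔ z = 0) from fun z => by simp [Int.ofNat_eq_natCast]]
    rw [nat_ldiff_eq_zero_iff]
    constructor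
    · intro h
      rcases h k with h' | h'
      · exfalso; rw [Nat.testBit_two_pow] at h'; simp at h'
      · simp [h']
    · intro h i
      by_cases hik : i = k
      · subst hik; right; simpa using h
      · left; rw [Nat.testBit_two_pow]; simp [Ne.symm hik]

theorem land_mask_eq_zero (c : Int) :
    (PySem.Int.band c 2147483647 = 0) ↔ ∀ i, i < 31 → c.testBit i = false := by
  rw [band_eq_land]
  have hM : (2147483647 : Int) = Int.ofNat (2^31 - 1) := by norm_num
  rw [hM]
  cases c with
  | ofNat p =>
    show (Int.ofNat (p &&& (2^31 - 1)) = 0) ↔ (∀ i, i < 31 → p.testBit i = false)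
    rw [show ∀ z : Nat, (Int.ofNat z = 0 ↔ z = 0) from fun z => by simp [Int.ofNat_eq_natCast]]
    rw [nat_land_eq_zero_iff]
    constructor
    · intro h i hi
      rcases h i with h' | h'
      · exact h'
      · exfalso; rw [Nat.testBit_two_pow_sub_one] at h'; simp [hi] at h'
    · intro h i
      by_cases hi : i < 31
      · exact Or.inl (h i hi)
      · right; rw [Nat.testBit_two_pow_sub_one]; simp [hi]
  | negSucc q =>
    show (Int.ofNat (Nat.ldiff (2^31 - 1) q) = 0) ↔ (∀ i, i < 31 → (!q.testBit i) = false)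
    rw [show ∀ z : Nat, (Int.ofNat z = 0 ↔ z = 0) from fun z => by simp [Int.ofNat_eq_natCast]]
    rw [nat_ldiff_eq_zero_iff]
    constructor
    · intro h i hi
      rcases h i with h' | h'
      · exfalso; rw [Nat.testBit_two_pow_sub_one] at h'; simp [hi] at h'
      · simp [h']
    · intro h i
      by_cases hi : i < 31
      · have := h i hi; simp at this; right; exact this
      · left; rw [Nat.testBit_two_pow_sub_one]; simp [hi]

-- y contributes, among the low 31 bits, a bit outside the pivot x
def ubadB (x y : Int) : Bool := (List.range 31).any (fun k => y.testBit k && !x.testBit k)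

theorem testA_eq (y : Int) (k : Nat) :
    (PySem.Int.band y ((1:Int) <<< k) == 0) = !y.testBit k := by
  by_cases h : PySem.Int.band y ((1:Int) <<< k) = 0
  · simp [h, (land_two_pow_eq_zero y k).mp h]
  · have hb : y.testBit k = true := by
      rcases ht : y.testBit k
      · exact absurd ((land_two_pow_eq_zero y k).mpr ht) h
      · rfl
    simp [h, hb]

theorem pySub31_eq (y x : Int) : pySub31 y x = !ubadB x y := by
  have hbit : ∀ i, (PySem.Int.band y (Int.not x)).testBit i = (y.testBit i && !x.testBit i) := by
    intro i
    rw [band_eq_land]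
    have hnot : Int.not x = Int.lnot x := rfl
    rw [hnot, Int.testBit_land, Int.testBit_lnot]
  unfold pySub31
  by_cases h : PySem.Int.band (PySem.Int.band y (Int.not x)) 2147483647 = 0
  · have h' := (land_mask_eq_zero _).mp h
    have : ubadB x y = false := by
      unfold ubadB
      simp only [List.any_eq_false, List.mem_range]
      intro k hk
      have := h' k hk
      rw [hbit k] at this
      simp [this]
    simp [h, this]
  · have : ubadB x y = true := by
      unfold ubadB
      by_contra hc
      simp only [Bool.not_eq_true, List.any_eq_false, List.mem_range] at hc
      exact h ((land_mask_eq_zero _).mpr (fun i hi => by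
        rw [hbit i]
        have := hc i hi
        simpa using this))
    simp [h, this]

/- ---------- generic last/first hit and skip-max/min folds ---------- -/

def lastHit (p : Nat → Bool) (i : Nat) : Int :=
  (List.range i).foldl (fun acc j => if p j then (j : Int) else acc) (-1)

def firstHit (p : Nat → Bool) (n s : Nat) : Int :=
  (List.range' s (n - s)).foldr (fun j acc => if p j then (j : Int) else acc) (n : Int)

theorem lastHit_succ (p : Nat → Bool) (i : Nat) :
    lastHit p (i+1) = if p i then (i : Int) else lastHit p i := by
  unfold lastHit
  rw [List.range_succ, List.foldl_append]
  simp

theorem lastHit_bounds (p : Nat → Bool) (i : Nat) : -1 ≤ lastHit p i ∧ lastHit p i < i := by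
  induction i with
  | zero => simp [lastHit]
  | succ i ih =>
    rw [lastHit_succ]
    split_ifs with h
    · exact ⟨by omega, by push_cast; omega⟩
    · exact ⟨ih.1, by have := ih.2; push_cast at this ⊢; omega⟩

theorem firstHit_last (p : Nat → Bool) (n : Nat) : firstHit p n n = n := by
  simp [firstHit]

theorem firstHit_succ (p : Nat → Bool) (n s : Nat) (h : s < n) :
    firstHit p n s = if p s then (s : Int) else firstHit p n (s+1) := by
  unfold firstHit
  have h1 : n - s = (n - (s+1)) + 1 := by omega
  rw [h1, List.range'_succ]
  simp

theorem firstHit_bounds (p : Nat → Bool) (n s : Nat) (h : s ≤ n) :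
    (s : Int) ≤ firstHit p n s ∧ firstHit p n s ≤ n := by
  rcases Nat.le.dest h with ⟨k, hk⟩
  induction k generalizing s with
  | zero => rw [show s = n by omega, firstHit_last]; omega
  | succ k ih =>
    have hs : s < n := by omega
    rw [firstHit_succ p n s hs]
    have := ih (s+1) (by omega) (by omega)
    split_ifs with hp
    · push_cast; omega
    · push_cast at this ⊢; omega

theorem skipmax_ge_init (l : List Nat) (p : Nat → Bool) (f : Nat → Int) (a : Int) :
    a ≤ l.foldl (fun acc b => if p b then acc else max acc (f b)) a := by
  induction l generalizing a with
  | nil => simp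
  | cons b l ih =>
    simp only [List.foldl_cons]
    split_ifs with h
    · exact ih a
    · exact le_trans (le_max_left _ _) (ih _)

theorem skipmax_le (l : List Nat) (p : Nat → Bool) (f : Nat → Int) (a v : Int)
    (ha : a ≤ v) (hf : ∀ b ∈ l, p b = false → f b ≤ v) :
    l.foldl (fun acc b => if p b then acc else max acc (f b)) a ≤ v := by
  induction l generalizing a with
  | nil => simpa
  | cons b l ih =>
    simp only [List.foldl_cons]
    split_ifs with h
    · exact ih a ha (fun c hc => hf c (List.mem_cons_of_mem _ hc))
    · exact ih _ (max_le ha (hf b (List.mem_cons_self) (by simpa using h)))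
        (fun c hc => hf c (List.mem_cons_of_mem _ hc))

theorem skipmax_ge_mem (l : List Nat) (p : Nat → Bool) (f : Nat → Int) (a : Int)
    (b : Nat) (hb : b ∈ l) (hp : p b = false) :
    f b ≤ l.foldl (fun acc c => if p c then acc else max acc (f c)) a := by
  induction l generalizing a with
  | nil => cases hb
  | cons c l ih =>
    simp only [List.foldl_cons]
    rcases List.mem_cons.mp hb with rfl | hb'
    · rw [if_neg (by simp [hp])]
      exact le_trans (le_max_right _ _) (skipmax_ge_init l p f _)
    · split_ifs <;> exact ih _ hb'

theorem skipmin_le_init (l : List Nat) (p : Nat → Bool) (f : Nat → Int) (a : Int) :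
    l.foldl (fun acc b => if p b then acc else min acc (f b)) a ≤ a := by
  induction l generalizing a with
  | nil => simp
  | cons b l ih =>
    simp only [List.foldl_cons]
    split_ifs with h
    · exact ih a
    · exact le_trans (ih _) (min_le_left _ _)

theorem skipmin_ge (l : List Nat) (p : Nat → Bool) (f : Nat → Int) (a v : Int)
    (ha : v ≤ a) (hf : ∀ b ∈ l, p b = false → v ≤ f b) :
    v ≤ l.foldl (fun acc b => if p b then acc else min acc (f b)) a := by
  induction l generalizing a with
  | nil => simpa
  | cons b l ih =>
    simp only [List.foldl_cons]
    split_ifs with h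
    · exact ih a ha (fun c hc => hf c (List.mem_cons_of_mem _ hc))
    · exact ih _ (le_min ha (hf b (List.mem_cons_self) (by simpa using h)))
        (fun c hc => hf c (List.mem_cons_of_mem _ hc))

theorem skipmin_le_mem (l : List Nat) (p : Nat → Bool) (f : Nat → Int) (a : Int)
    (b : Nat) (hb : b ∈ l) (hp : p b = false) :
    l.foldl (fun acc c => if p c then acc else min acc (f c)) a ≤ f b := by
  induction l generalizing a with
  | nil => cases hb
  | cons c l ih =>
    simp only [List.foldl_cons]
    rcases List.mem_cons.mp hb with rfl | hb'
    · rw [if_neg (by simp [hp])]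
      exact le_trans (skipmin_le_init l p f _) (min_le_right _ _)
    · split_ifs <;> exact ih _ hb'

/- ---------- characterisation of A's tables ---------- -/

def LS (nums : List Int) (b : Nat) (i : Nat) : Int :=
  lastHit (fun j => (nums.getD j 0).testBit b) i

def NS (nums : List Int) (n : Nat) (b : Nat) (s : Nat) : Int :=
  firstHit (fun j => (nums.getD j 0).testBit b) n s

def LA (nums : List Int) (x : Int) (i : Nat) : Int :=
  (List.range 31).foldl (fun a b => if x.testBit b then a else max a (LS nums b i + 1)) 0

def RA (nums : List Int) (n : Nat) (x : Int) (s : Nat) : Int :=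
  (List.range 31).foldl (fun a b => if x.testBit b then a else min a (NS nums n b s - 1)) ((n : Int) - 1)

theorem LA_eq (nums : List Int) (x : Int) (i : Nat) :
    LA nums x i = lastHit (fun j => ubadB x (nums.getD j 0)) i + 1 := by
  induction i with
  | zero =>
    have : ∀ b, LS nums b 0 = -1 := fun b => rfl
    simp only [LA, this]
    have : (List.range 31).foldl (fun a b => if x.testBit b then a else max a ((-1:Int) + 1)) 0 = 0 := by
      have hle := skipmax_le (List.range 31) (fun b => x.testBit b) (fun _ => (-1:Int)+1) 0 0
        (le_refl _) (fun b _ _ => by simp)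
      have hge := skipmax_ge_init (List.range 31) (fun b => x.testBit b) (fun _ => (-1:Int)+1) 0
      beta_reduce at hle hge
      omega
    rw [this]; rfl
  | succ i ih =>
    have hLS : ∀ b, LS nums b (i+1) = if (nums.getD i 0).testBit b then (i:Int) else LS nums b i :=
      fun b => lastHit_succ _ i
    rw [lastHit_succ]
    by_cases hbad : ubadB x (nums.getD i 0) = true
    · rw [if_pos hbad]
      obtain ⟨b0, hb0m, hb0⟩ : ∃ b0 ∈ List.range 31,
          (nums.getD i 0).testBit b0 = true ∧ x.testBit b0 = false := by
        unfold ubadB at hbad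
        simp only [List.any_eq_true] at hbad
        obtain ⟨b0, hm, hb⟩ := hbad
        exact ⟨b0, hm, by simpa using hb⟩
      have hub : ∀ b ∈ List.range 31, x.testBit b = false → LS nums b (i+1) + 1 ≤ (i:Int) + 1 := by
        intro b _ _
        rw [hLS b]
        have := (lastHit_bounds (fun j => (nums.getD j 0).testBit b) i)
        simp only [LS, lastHit] at *
        split_ifs <;> push_cast at * <;> omega
      have hex : LS nums b0 (i+1) + 1 = (i:Int) + 1 := by rw [hLS b0, if_pos hb0.1]
      unfold LA
      have h1 := skipmax_le (List.range 31) (fun b => x.testBit b)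
        (fun b => LS nums b (i+1) + 1) 0 ((i:Int)+1) (by positivity) hub
      have h2 := skipmax_ge_mem (List.range 31) (fun b => x.testBit b)
        (fun b => LS nums b (i+1) + 1) 0 b0 hb0m hb0.2
      beta_reduce at h1 h2
      omega
    · rw [if_neg (by simpa using hbad)]
      rw [← ih]
      unfold LA
      apply PySem.List.foldl_congr_mem
      intro acc b hb
      by_cases hxb : x.testBit b
      · simp [hxb]
      · have hxb' : x.testBit b = false := by simpa using hxb
        have hnb : (nums.getD i 0).testBit b = false := by
          rcases hnb : (nums.getD i 0).testBit b
          · rfl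
          · exfalso
            apply hbad
            unfold ubadB
            simp only [List.any_eq_true]
            refine ⟨b, hb, ?_⟩
            rw [hnb, hxb']
            rfl
        rw [hLS b]
        have hnb2 : (nums[i]?.getD 0).testBit b = false := hnb
        simp [hnb2]

theorem RA_eq (nums : List Int) (n : Nat) (x : Int) (s : Nat) (hs : s ≤ n) :
    RA nums n x s = firstHit (fun j => ubadB x (nums.getD j 0)) n s - 1 := by
  rcases Nat.le.dest hs with ⟨k, hk⟩
  induction k generalizing s with
  | zero =>
    have hsn : s = n := by omega
    subst hsn
    rw [firstHit_last]
    have hNSn : ∀ b, NS nums s b s = (s:Int) := fun b => firstHit_last _ s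
    unfold RA
    simp only [hNSn]
    have hle := skipmin_le_init (List.range 31) (fun b => x.testBit b)
      (fun _ => (s:Int) - 1) ((s:Int) - 1)
    have hge := skipmin_ge (List.range 31) (fun b => x.testBit b)
      (fun _ => (s:Int) - 1) ((s:Int) - 1) ((s:Int) - 1) (le_refl _) (fun b _ _ => le_refl _)
    beta_reduce at hle hge
    omega
  | succ k ih =>
    have hsn : s < n := by omega
    have hNS : ∀ b, NS nums n b s = if (nums.getD s 0).testBit b then (s:Int) else NS nums n b (s+1) :=
      fun b => firstHit_succ _ n s hsn
    rw [firstHit_succ _ n s hsn]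
    by_cases hbad : ubadB x (nums.getD s 0) = true
    · rw [if_pos hbad]
      obtain ⟨b0, hb0m, hb0⟩ : ∃ b0 ∈ List.range 31,
          (nums.getD s 0).testBit b0 = true ∧ x.testBit b0 = false := by
        unfold ubadB at hbad
        simp only [List.any_eq_true] at hbad
        obtain ⟨b0, hm, hb⟩ := hbad
        exact ⟨b0, hm, by simpa using hb⟩
      have hub : ∀ b ∈ List.range 31, x.testBit b = false → (s:Int) - 1 ≤ NS nums n b s - 1 := by
        intro b _ _
        rw [hNS b]
        have := firstHit_bounds (fun j => (nums.getD j 0).testBit b) n (s+1) (by omega)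
        simp only [NS] at *
        split_ifs <;> push_cast at * <;> omega
      have hex : NS nums n b0 s - 1 = (s:Int) - 1 := by rw [hNS b0, if_pos hb0.1]
      unfold RA
      have h1 := skipmin_ge (List.range 31) (fun b => x.testBit b)
        (fun b => NS nums n b s - 1) ((n:Int)-1) ((s:Int)-1)
        (by push_cast; omega) hub
      have h2 := skipmin_le_mem (List.range 31) (fun b => x.testBit b)
        (fun b => NS nums n b s - 1) ((n:Int)-1) b0 hb0m hb0.2
      beta_reduce at h1 h2
      omega
    · rw [if_neg (by simpa using hbad)]
      rw [← ih (s+1) (by omega) (by omega)]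
      unfold RA
      apply PySem.List.foldl_congr_mem
      intro acc b hb
      by_cases hxb : x.testBit b
      · simp [hxb]
      · have hxb' : x.testBit b = false := by simpa using hxb
        have hnb : (nums.getD s 0).testBit b = false := by
          rcases hnb : (nums.getD s 0).testBit b
          · rfl
          · exfalso
            apply hbad
            unfold ubadB
            simp only [List.any_eq_true]
            refine ⟨b, hb, ?_⟩
            rw [hnb, hxb']
            rfl
        rw [hNS b]
        have hnb2 : (nums[s]?.getD 0).testBit b = false := hnb
        simp [hnb2]

/- ---------- the inner 31-bit folds ---------- -/

/- ---------- small list helpers ---------- -/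

theorem getD_set_self (l : List Int) (b : Nat) (x : Int) (hb : b < l.length) :
    (l.set b x).getD b 0 = x := by
  simp [List.getD, hb]

theorem getD_set_ne (l : List Int) (b c : Nat) (x : Int) (h : c ≠ b) :
    (l.set b x).getD c 0 = l.getD c 0 := by
  simp [List.getD, List.getElem?_set, h.symm]

theorem getD_replicate' (m : Nat) (x : Int) (b : Nat) (hb : b < m) :
    (List.replicate m x).getD b 0 = x := by
  rw [List.getD_eq_getElem?_getD, List.getElem?_replicate]
  simp [hb]

theorem getD_map_range (f : Nat → Int) (n i : Nat) (h : i < n) :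
    (List.map f (List.range n)).getD i 0 = f i := by
  simp [List.getD, h]

theorem pyAInnerL_eq (nums : List Int) (i : Nat) (s : List Int × Int) (c : Nat) :
    pyAInnerL nums i s c
      = if (nums.getD i 0).testBit c then (s.1.set c (i : Int), s.2)
        else (s.1, max s.2 (s.1.getD c 0 + 1)) := by
  unfold pyAInnerL
  rw [testA_eq]
  rcases h : (nums.getD i 0).testBit c <;> simp [h]

theorem pyAInnerR_eq (nums : List Int) (i : Nat) (s : List Int × Int) (c : Nat) :
    pyAInnerR nums i s c
      = if (nums.getD i 0).testBit c then (s.1.set c (i : Int), s.2)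
        else (s.1, min s.2 (s.1.getD c 0 - 1)) := by
  unfold pyAInnerR
  rw [testA_eq]
  rcases h : (nums.getD i 0).testBit c <;> simp [h]

theorem pyAStepL_eq (nums : List Int) (st : List Int × List Int) (i : Nat) :
    pyAStepL nums st i
      = (((List.range 31).foldl (pyAInnerL nums i) (st.1, 0)).1,
         st.2 ++ [((List.range 31).foldl (pyAInnerL nums i) (st.1, 0)).2]) := rfl

theorem pyAStepR_eq (nums : List Int) (n : Nat) (st : List Int × List Int) (i : Nat) :
    pyAStepR nums n st i
      = (((List.range 31).foldl (pyAInnerR nums i) (st.1, (n:Int)-1)).1,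
         ((List.range 31).foldl (pyAInnerR nums i) (st.1, (n:Int)-1)).2 :: st.2) := rfl

theorem innerL_spec (nums : List Int) (i : Nat) (bs : List Nat) :
    ∀ (prev : List Int) (acc : Int), prev.length = 31 → (∀ b ∈ bs, b < 31) →
      (bs.foldl (pyAInnerL nums i) (prev, acc)).2
        = bs.foldl (fun a b => if (nums.getD i 0).testBit b then a else max a (prev.getD b 0 + 1)) acc
      ∧ (bs.foldl (pyAInnerL nums i) (prev, acc)).1.length = 31
      ∧ ∀ b : Nat, (bs.foldl (pyAInnerL nums i) (prev, acc)).1.getD b 0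
          = if b ∈ bs ∧ (nums.getD i 0).testBit b then (i : Int) else prev.getD b 0 := by
  induction bs with
  | nil =>
    intro prev acc hlen _
    exact ⟨rfl, hlen, fun b => by simp⟩
  | cons c bs ih =>
    intro prev acc hlen hbs
    have hc : c < 31 := hbs c List.mem_cons_self
    have hbs' : ∀ b ∈ bs, b < 31 := fun b hb => hbs b (List.mem_cons_of_mem _ hb)
    simp only [List.foldl_cons]
    rw [pyAInnerL_eq]
    rcases ht : (nums.getD i 0).testBit c
    · rw [if_neg (by simp [ht]), if_neg (by simp [ht])]
      obtain ⟨ihv, ihl, ihd⟩ := ih prev (max acc (prev.getD c 0 + 1)) hlen hbs'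
      refine ⟨ihv, ihl, ?_⟩
      intro b
      rw [ihd b]
      by_cases hbc : b = c
      · subst hbc
        have ht' : (nums[i]?.getD 0).testBit b = false := ht
        simp [ht']
      · simp [hbc]
    · simp only [reduceIte]
      obtain ⟨ihv, ihl, ihd⟩ := ih (prev.set c (i : Int)) acc (by simpa using hlen) hbs'
      refine ⟨?_, ihl, ?_⟩
      · rw [ihv]
        apply PySem.List.foldl_congr_mem
        intro a b hb
        by_cases hbc : b = c
        · subst hbc
          have ht' : (nums[i]?.getD 0).testBit b = true := ht
          simp [ht']
        · rw [getD_set_ne prev c b (i:Int) hbc]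
      · intro b
        rw [ihd b]
        by_cases hbc : b = c
        · subst hbc
          have ht' : (nums[i]?.getD 0).testBit b = true := ht
          rw [getD_set_self prev b (i:Int) (by omega)]
          simp [ht']
        · rw [getD_set_ne prev c b (i:Int) hbc]
          simp [hbc]

theorem innerR_spec (nums : List Int) (i : Nat) (bs : List Nat) :
    ∀ (prev : List Int) (acc : Int), prev.length = 31 → (∀ b ∈ bs, b < 31) →
      (bs.foldl (pyAInnerR nums i) (prev, acc)).2
        = bs.foldl (fun a b => if (nums.getD i 0).testBit b then a else min a (prev.getD b 0 - 1)) acc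
      ∧ (bs.foldl (pyAInnerR nums i) (prev, acc)).1.length = 31
      ∧ ∀ b : Nat, (bs.foldl (pyAInnerR nums i) (prev, acc)).1.getD b 0
          = if b ∈ bs ∧ (nums.getD i 0).testBit b then (i : Int) else prev.getD b 0 := by
  induction bs with
  | nil =>
    intro prev acc hlen _
    exact ⟨rfl, hlen, fun b => by simp⟩
  | cons c bs ih =>
    intro prev acc hlen hbs
    have hc : c < 31 := hbs c List.mem_cons_self
    have hbs' : ∀ b ∈ bs, b < 31 := fun b hb => hbs b (List.mem_cons_of_mem _ hb)
    simp only [List.foldl_cons]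
    rw [pyAInnerR_eq]
    rcases ht : (nums.getD i 0).testBit c
    · rw [if_neg (by simp [ht]), if_neg (by simp [ht])]
      obtain ⟨ihv, ihl, ihd⟩ := ih prev (min acc (prev.getD c 0 - 1)) hlen hbs'
      refine ⟨ihv, ihl, ?_⟩
      intro b
      rw [ihd b]
      by_cases hbc : b = c
      · subst hbc
        have ht' : (nums[i]?.getD 0).testBit b = false := ht
        simp [ht']
      · simp [hbc]
    · simp only [reduceIte]
      obtain ⟨ihv, ihl, ihd⟩ := ih (prev.set c (i : Int)) acc (by simpa using hlen) hbs'
      refine ⟨?_, ihl, ?_⟩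
      · rw [ihv]
        apply PySem.List.foldl_congr_mem
        intro a b hb
        by_cases hbc : b = c
        · subst hbc
          have ht' : (nums[i]?.getD 0).testBit b = true := ht
          simp [ht']
        · rw [getD_set_ne prev c b (i:Int) hbc]
      · intro b
        rw [ihd b]
        by_cases hbc : b = c
        · subst hbc
          have ht' : (nums[i]?.getD 0).testBit b = true := ht
          rw [getD_set_self prev b (i:Int) (by omega)]
          simp [ht']
        · rw [getD_set_ne prev c b (i:Int) hbc]
          simp [hbc]

theorem leftPass_spec (nums : List Int) (t : Nat) :
    ((List.range t).foldl (pyAStepL nums) (List.replicate 31 (-1 : Int), [])).1.length = 31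
    ∧ (∀ b, b < 31 → ((List.range t).foldl (pyAStepL nums) (List.replicate 31 (-1 : Int), [])).1.getD b 0 = LS nums b t)
    ∧ ((List.range t).foldl (pyAStepL nums) (List.replicate 31 (-1 : Int), [])).2
        = (List.range t).map (fun i => LA nums (nums.getD i 0) i) := by
  induction t with
  | zero =>
    refine ⟨by simp, fun b hb => ?_, by simp⟩
    simp only [List.range_zero, List.foldl_nil]
    rw [getD_replicate' 31 (-1) b hb]
    rfl
  | succ t ih =>
    obtain ⟨ih1, ih2, ih3⟩ := ih
    rw [List.range_succ, List.foldl_append, List.foldl_cons, List.foldl_nil, pyAStepL_eq]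
    obtain ⟨hv, hl, hd⟩ := innerL_spec nums t (List.range 31) _ 0 ih1
      (fun b hb => List.mem_range.mp hb)
    refine ⟨hl, fun b hb => ?_, ?_⟩
    · rw [hd b]
      have hmem : b ∈ List.range 31 := List.mem_range.mpr hb
      have hLSs : LS nums b (t+1)
          = if (nums.getD t 0).testBit b then (t:Int) else LS nums b t := lastHit_succ _ t
      rw [hLSs]
      rcases htb : (nums.getD t 0).testBit b
      · rw [if_neg (by simp), if_neg (by simp), ih2 b hb]
      · rw [if_pos ⟨hmem, rfl⟩, if_pos (by simp)]
    · show _ ++ [((List.range 31).foldl (pyAInnerL nums t) (_, 0)).2] = _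
      rw [List.map_append, ← ih3, hv]
      congr 2
      unfold LA
      apply PySem.List.foldl_congr_mem
      intro a b hb
      rw [ih2 b (List.mem_range.mp hb)]

theorem rightPass_spec (nums : List Int) (n : Nat) :
    ∀ (t : Nat), t ≤ n → ∀ (prev : List Int) (accl : List Int),
      prev.length = 31 → (∀ b, b < 31 → prev.getD b 0 = NS nums n b t) →
      (((List.range t).reverse).foldl (pyAStepR nums n) (prev, accl)).2
        = (List.range' 0 t).map (fun i => RA nums n (nums.getD i 0) (i+1)) ++ accl := by
  intro t
  induction t with
  | zero => intro _ prev accl _ _; simp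
  | succ t ih =>
    intro ht prev accl hlen hinv
    have hrev : (List.range (t+1)).reverse = t :: (List.range t).reverse := by
      simp [List.range_succ]
    rw [hrev, List.foldl_cons, pyAStepR_eq]
    obtain ⟨hv, hl, hd⟩ := innerR_spec nums t (List.range 31) prev ((n:Int)-1) hlen
      (fun b hb => List.mem_range.mp hb)
    have hstep : ∀ b, b < 31 →
        ((List.range 31).foldl (pyAInnerR nums t) (prev, (n:Int)-1)).1.getD b 0 = NS nums n b t := by
      intro b hb
      rw [hd b]
      have hmem : b ∈ List.range 31 := List.mem_range.mpr hb
      have hNSs : NS nums n b t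
          = if (nums.getD t 0).testBit b then (t:Int) else NS nums n b (t+1) :=
        firstHit_succ _ n t (by omega)
      rw [hNSs]
      rcases htb : (nums.getD t 0).testBit b
      · rw [if_neg (by simp), if_neg (by simp), hinv b hb]
      · rw [if_pos ⟨hmem, rfl⟩, if_pos (by simp)]
    have hval : ((List.range 31).foldl (pyAInnerR nums t) (prev, (n:Int)-1)).2
        = RA nums n (nums.getD t 0) (t+1) := by
      rw [hv]
      unfold RA
      apply PySem.List.foldl_congr_mem
      intro a b hb
      rw [hinv b (List.mem_range.mp hb)]
    rw [ih (by omega) _ _ hl hstep, hval]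
    rw [show List.range' 0 (t+1) = List.range' 0 t ++ [t] by simp [List.range'_concat]]
    simp

/- ---------- loop 3 and walk characterisations ---------- -/

theorem pyWalkL_eq (nums : List Int) (x : Int) (i : Nat) :
    (pyWalkL nums x i : Int)
      = lastHit (fun j => ubadB x (nums.getD j 0) || (nums.getD j 0 == x)) i + 1 := by
  induction i with
  | zero => simp [pyWalkL, lastHit]
  | succ i ih =>
    rw [pyWalkL, lastHit_succ, pySub31_eq]
    rcases hu : ubadB x (nums.getD i 0) with _ | _ <;>
      rcases he : (nums.getD i 0 == x) with _ | _ <;>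
      simp [ih] <;> push_cast <;> ring

theorem pyWalkR_eq (nums : List Int) (x : Int) (n : Nat) :
    ∀ (k r : Nat), r + 1 + k = n →
    (pyWalkR nums x n r : Int)
      = firstHit (fun j => ubadB x (nums.getD j 0)) n (r+1) - 1 := by
  intro k
  induction k with
  | zero =>
    intro r hr
    rw [pyWalkR]
    rw [dif_neg (by omega)]
    rw [show n = r + 1 from hr.symm, firstHit_last]
    push_cast
    ring
  | succ k ih =>
    intro r hr
    rw [pyWalkR, dif_pos (by omega : r + 1 < n)]
    rw [firstHit_succ _ n (r+1) (by omega), pySub31_eq]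
    rcases hu : ubadB x (nums.getD (r+1) 0)
    · simp only [Bool.not_false, Bool.not_true, reduceIte]
      rw [ih (r+1) (by omega)]
      simp
    · simp only [Bool.not_false, Bool.not_true, reduceIte]
      push_cast
      ring

theorem loop3_spec (nums left right : List Int) (t : Nat) :
    (∀ v : Int, ((List.range t).foldl (pyAStep3 nums left right) (0, PySem.Dict.empty)).2.get? v
      = (if lastHit (fun j => nums.getD j 0 == v) t < 0 then none
         else some (lastHit (fun j => nums.getD j 0 == v) t)))
    ∧ ((List.range t).foldl (pyAStep3 nums left right) (0, PySem.Dict.empty)).1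
      = (List.range t).foldl (fun (acc : Int) (i : Nat) =>
          acc + ((i : Int) -
            (if lastHit (fun j => nums.getD j 0 == nums.getD i 0) i < 0 then left.getD i 0
             else max (left.getD i 0) (lastHit (fun j => nums.getD j 0 == nums.getD i 0) i + 1)) + 1)
            * (right.getD i 0 - (i : Int) + 1)) 0 := by
  induction t with
  | zero =>
    constructor
    · intro v
      simp [lastHit]
    · rfl
  | succ t ih =>
    obtain ⟨ih1, ih2⟩ := ih
    rw [List.range_succ, List.foldl_append, List.foldl_cons, List.foldl_nil,
        List.foldl_append, List.foldl_cons, List.foldl_nil]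
    constructor
    · intro v
      show (PySem.Dict.insert _ (nums.getD t 0) (t : Int)).get? v = _
      rw [PySem.Dict.get?_insert]
      have hlh : lastHit (fun j => nums.getD j 0 == v) (t+1)
          = if (nums.getD t 0 == v) then (t:Int) else lastHit (fun j => nums.getD j 0 == v) t :=
        lastHit_succ _ t
      by_cases hv : v = nums.getD t 0
      · rw [if_pos hv, hlh, if_pos (show (nums.getD t 0 == v) = true by simp [hv])]
        rw [if_neg (show ¬((t:Int) < 0) by omega)]
      · rw [if_neg hv, hlh, if_neg (show ¬((nums.getD t 0 == v) = true) from fun hcon => hv (beq_iff_eq.mp hcon).symm)]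
        rw [ih1 v]
    · show ((List.foldl (pyAStep3 nums left right) (0, PySem.Dict.empty) (List.range t)).1
          + ((t : Int) - _ + 1) * (right.getD t 0 - (t : Int) + 1)) = _
      rw [ih2]
      congr 1
      have hget := ih1 (nums.getD t 0)
      rcases hlt : decide (lastHit (fun j => nums.getD j 0 == nums.getD t 0) t < 0)
      · have hlt' : ¬ lastHit (fun j => nums.getD j 0 == nums.getD t 0) t < 0 := by
          simpa using hlt
        rw [if_neg hlt'] at hget
        show ((t : Int) - _ + 1) * _ = _
        rw [hget, if_neg hlt']
      · have hlt' : lastHit (fun j => nums.getD j 0 == nums.getD t 0) t < 0 := by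
          simpa using hlt
        rw [if_pos hlt'] at hget
        show ((t : Int) - _ + 1) * _ = _
        rw [hget, if_pos hlt']

theorem max_lastHit (p q : Nat → Bool) (i : Nat) :
    max (lastHit p i + 1) (lastHit q i + 1) = lastHit (fun j => p j || q j) i + 1 := by
  induction i with
  | zero => simp [lastHit]
  | succ i ih =>
    rw [lastHit_succ, lastHit_succ, lastHit_succ]
    have hp := lastHit_bounds p i
    have hq := lastHit_bounds q i
    have hpq := lastHit_bounds (fun j => p j || q j) i
    rcases h1 : p i <;> rcases h2 : q i <;> simp <;> omega

theorem portA_eq (nums : List Int) : countGoodSubarrays nums =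
    ((List.range nums.length).foldl (pyAStep3 nums
       (((List.range nums.length).foldl (pyAStepL nums) (List.replicate 31 (-1:Int), [])).2)
       ((((List.range nums.length).reverse).foldl (pyAStepR nums nums.length)
           (List.replicate 31 (nums.length : Int), [])).2))
     (0, PySem.Dict.empty)).1 := rfl

theorem portB_eq (nums : List Int) : countGoodSubarrays_alt nums =
    (List.range nums.length).foldl (fun (total : Int) (i : Nat) =>
      total + ((i:Int) - (pyWalkL nums (nums.getD i 0) i : Int) + 1)
        * ((pyWalkR nums (nums.getD i 0) nums.length i : Int) - (i:Int) + 1)) 0 := rfl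

theorem main_eq (nums : List Int) : countGoodSubarrays nums = countGoodSubarrays_alt nums := by
  rw [portA_eq, portB_eq]
  obtain ⟨hL1, hL2, hL3⟩ := leftPass_spec nums nums.length
  have hR := rightPass_spec nums nums.length nums.length le_rfl
    (List.replicate 31 (nums.length : Int)) [] (by simp)
    (fun b hb => by
      rw [getD_replicate' 31 (nums.length : Int) b hb]
      unfold NS
      rw [firstHit_last])
  rw [hL3, hR, List.append_nil, ← List.range_eq_range']
  rw [(loop3_spec nums
        ((List.range nums.length).map (fun i => LA nums (nums.getD i 0) i))
        ((List.range nums.length).map (fun i => RA nums nums.length (nums.getD i 0) (i+1)))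
        nums.length).2]
  apply PySem.List.foldl_congr_mem
  intro acc i hi
  have hin : i < nums.length := List.mem_range.mp hi
  rw [getD_map_range (fun i => LA nums (nums.getD i 0) i) nums.length i hin,
      getD_map_range (fun i => RA nums nums.length (nums.getD i 0) (i+1)) nums.length i hin]
  have hWL := pyWalkL_eq nums (nums.getD i 0) i
  have hWR := pyWalkR_eq nums (nums.getD i 0) nums.length (nums.length - i - 1) i (by omega)
  have hRA := RA_eq nums nums.length (nums.getD i 0) (i+1) (by omega)
  have hLAe := LA_eq nums (nums.getD i 0) i
  have hmax := max_lastHit (fun j => ubadB (nums.getD i 0) (nums.getD j 0))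
    (fun j => nums.getD j 0 == nums.getD i 0) i
  have hb1 := lastHit_bounds (fun j => ubadB (nums.getD i 0) (nums.getD j 0)) i
  have hb2 := lastHit_bounds (fun j => nums.getD j 0 == nums.getD i 0) i
  rw [hRA, hLAe, hWL, hWR]
  split_ifs with hc
  · have hle : lastHit (fun j => nums.getD j 0 == nums.getD i 0) i = -1 := by omega
    have hm2 : max (lastHit (fun j => ubadB (nums.getD i 0) (nums.getD j 0)) i + 1)
        (lastHit (fun j => nums.getD j 0 == nums.getD i 0) i + 1)
        = lastHit (fun j => ubadB (nums.getD i 0) (nums.getD j 0)) i + 1 := by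
      rw [hle]
      exact max_eq_left (by omega)
    have hlo : lastHit (fun j => ubadB (nums.getD i 0) (nums.getD j 0) || (nums.getD j 0 == nums.getD i 0)) i
        = lastHit (fun j => ubadB (nums.getD i 0) (nums.getD j 0)) i := by
      rw [hm2] at hmax
      omega
    rw [hlo]
  · rw [← hmax]

-- ===== VERDICT (by name: the statement is the Claim_ definition above) =====
theorem countGoodSubarrays_spec : Claim_equal_countGoodSubarrays := by
  intro nums _
  exact (main_eq nums).symm ▸ rfl
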